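-- pv_equiv track=rewrite | github.com/hunterschep/CS1-Homework | HW8_SCHEPPAT_HUNTER/BingoGame.py | isItBingo
-- ===== SOURCE A (Python) =====
-- def isItBingo(card):
--
--     # check if rows equal 0
--     for row in range(0, len(card)):
--         bingo_sum = 0
--         for col in range(0, len(card[0])):
--             bingo_sum += card[row][col]
--
--         if bingo_sum == 0:
--             return True
--
--     # check if cols equal 0
--     for row in range(0, len(card)):
--         bingo_sum = 0
--         for col in range(0, len(card[0])):
--             bingo_sum += card[col][row]
--
--         if bingo_sum == 0:
--             return True
--
--     # check if first diag equal 0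
--     bingo_sum = 0
--     for row in range(0, len(card)):
--         bingo_sum += card[row][row]
--
--     if bingo_sum == 0:
--         return True
--
--     # check if second diag equal 0
--     bingo_sum = 0
--     for row in range(0, len(card)):
--         bingo_sum += card[row][abs(row - ((len(card[row])) - 1))]
--
--     if bingo_sum == 0:
--         return True
--
--     return False
-- ===== SOURCE B (Python) =====
-- def isItBingo(card):
--     # One pass over the rows: a zero row sum is bingo immediately; otherwise
--     # accumulate column sums and both diagonal sums and test them at the end.
--     n = len(card)
--     cols = [0] * n
--     diag1 = 0
--     diag2 = 0
--     for i, row in enumerate(card):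
--         if sum(row) == 0:
--             return True
--         cols = [c + v for c, v in zip(cols, row)]
--         diag1 += row[i]
--         diag2 += row[n - 1 - i]
--     return 0 in cols or diag1 == 0 or diag2 == 0
-- ===== Notes on version B (the rewrite author's own statement) =====
-- stated objective: alternative
-- what changed: A makes four separate index-based scans (row loop, column loop, two diagonal loops); B makes one pass over the rows, returning True at the first zero row sum and otherwise accumulating column sums by zipping plus both diagonal sums, testing them once at the end.
-- outside the precondition, e.g. on isItBingo([[1, 2], [0, 0], [9, 9]]): A returns True, B raises IndexError
import Mathlib
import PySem

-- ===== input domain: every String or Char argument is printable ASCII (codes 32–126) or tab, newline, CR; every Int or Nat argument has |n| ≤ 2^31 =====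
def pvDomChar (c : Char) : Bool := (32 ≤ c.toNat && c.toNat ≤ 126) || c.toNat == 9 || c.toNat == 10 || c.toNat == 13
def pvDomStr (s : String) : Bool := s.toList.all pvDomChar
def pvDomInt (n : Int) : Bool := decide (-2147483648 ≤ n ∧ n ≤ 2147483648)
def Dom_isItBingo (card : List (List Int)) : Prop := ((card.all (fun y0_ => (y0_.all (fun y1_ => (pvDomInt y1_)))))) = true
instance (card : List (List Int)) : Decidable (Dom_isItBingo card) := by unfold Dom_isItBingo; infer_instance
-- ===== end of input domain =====

-- B replaces A's four separate scans by one pass over the rows that accumulates all line sums; same asymptotic cost (objective: alternative).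

-- ===== PORT A =====
-- literal transliteration of A: four scans in A's order, Python's early returns folded into the if-chain
def isItBingo (card : List (List Int)) : Bool :=
  if (PySem.List.pyRange 0 (PySem.List.len card) 1).any (fun row =>
       (PySem.List.pyRange 0 (PySem.List.len (PySem.List.pyGetD card 0 [])) 1).foldl
         (fun bingo_sum col => bingo_sum + PySem.List.pyGetD (PySem.List.pyGetD card row []) col 0) 0 == 0)
  then true
  else if (PySem.List.pyRange 0 (PySem.List.len card) 1).any (fun row =>
       (PySem.List.pyRange 0 (PySem.List.len (PySem.List.pyGetD card 0 [])) 1).foldl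
         (fun bingo_sum col => bingo_sum + PySem.List.pyGetD (PySem.List.pyGetD card col []) row 0) 0 == 0)
  then true
  else if (PySem.List.pyRange 0 (PySem.List.len card) 1).foldl
         (fun bingo_sum row => bingo_sum + PySem.List.pyGetD (PySem.List.pyGetD card row []) row 0) 0 == 0
  then true
  else if (PySem.List.pyRange 0 (PySem.List.len card) 1).foldl
         (fun bingo_sum row => bingo_sum +
            PySem.List.pyGetD (PySem.List.pyGetD card row [])
              ((row - (PySem.List.len (PySem.List.pyGetD card row []) - 1)).natAbs : Int) 0) 0 == 0
  then true
  else false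

-- ===== PORT B =====
-- literal transliteration of B: one loop over enumerate(card) with an early return on a
-- zero row sum, carrying (cols, diag1, diag2); the final line tests the accumulators
def bingoLoop (n : Nat) (l : List (Int × List Int)) (cols : List Int) (d1 d2 : Int) : Bool :=
  match l with
  | [] => cols.contains 0 || d1 == 0 || d2 == 0
  | p :: rest =>
    if p.2.sum == 0 then true
    else bingoLoop n rest (List.zipWith (fun c v => c + v) cols p.2)
           (d1 + PySem.List.pyGetD p.2 p.1 0)
           (d2 + PySem.List.pyGetD p.2 ((n : Int) - 1 - p.1) 0)

def isItBingo_alt (card : List (List Int)) : Bool :=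
  let n := card.length
  bingoLoop n (PySem.List.enumerate card) (List.replicate n 0) 0 0

-- ===== PRECONDITION & SPEC =====
-- Pre_ accepts square cards and any card whose first row sums to zero (there both programs
-- return True at once); it excludes the remaining non-square cards, on which A's
-- column/diagonal indexing raises IndexError unless a later zero row sum returns True first.
def Pre_isItBingo (card : List (List Int)) : Prop :=
  (∀ r ∈ card, r.length = card.length) ∨ (card ≠ [] ∧ card.headI.sum = 0)
instance (card : List (List Int)) : Decidable (Pre_isItBingo card) := by
  unfold Pre_isItBingo; infer_instance
def pvWitness_isItBingo : List (List Int) := [[1, 2], [3, 4]]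
def Spec_isItBingo (card : List (List Int)) (out : Bool) : Prop := out = isItBingo_alt card
instance (card : List (List Int)) (out : Bool) : Decidable (Spec_isItBingo card out) := by unfold Spec_isItBingo; infer_instance

-- ===== CLAIM (what is proved, stated in full; the proofs are below) =====
def Claim_equal_isItBingo : Prop := ∀ (card : List (List Int)), Dom_isItBingo card → Pre_isItBingo card → Spec_isItBingo card (isItBingo card)

-- ===== LEMMAS AND PROOFS =====

lemma pvIf4 (p q r s : Bool) :
    (if p then true else if q then true else if r then true else if s then true else false)
    = (p || (q || (r || s))) := by
  cases p <;> cases q <;> cases r <;> cases s <;> rfl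

lemma pvEnumFoldlSnd {α β : Type} (l : List α) (s : Int) (g : β → α → β) (init : β) :
    (PySem.List.enumerate l s).foldl (fun a p => g a p.2) init = l.foldl g init := by
  rw [← List.foldl_map (f := fun p : Int × α => p.2), PySem.List.map_snd_enumerate]

lemma pvEnumMapInt (l : List (List Int)) (s : Nat) (g : Int → List Int → Int) :
    (PySem.List.enumerate l (s : Int)).map (fun p => g p.1 p.2)
    = (List.range l.length).map (fun k => g ((s + k : Nat) : Int) (l.getD k [])) := by
  induction l generalizing s with
  | nil => rfl
  | cons x xs ih =>
    rw [PySem.List.enumerate_cons, List.map_cons, List.length_cons,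
        List.range_succ_eq_map, List.map_cons, List.map_map]
    have h1 : ((s : Int) + 1) = ((s + 1 : Nat) : Int) := by push_cast; ring
    rw [h1, ih (s + 1)]
    refine congrArg₂ List.cons (by simp) ?_
    refine List.map_congr_left (fun k hk => ?_)
    simp only [Function.comp_apply, Nat.succ_eq_add_one, List.getD_cons_succ]
    congr 1
    omega

lemma pvColsLen (l : List (List Int)) (init : List Int) (h : ∀ r ∈ l, r.length = init.length) :
    (l.foldl (fun c r => List.zipWith (fun c v => c + v) c r) init).length = init.length := by
  induction l generalizing init with
  | nil => rfl
  | cons r rs ih =>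
    rw [List.foldl_cons]
    have hz : (List.zipWith (fun c v => c + v) init r).length = init.length := by
      rw [List.length_zipWith, h r (List.mem_cons_self ..)]; omega
    rw [ih _ (fun r' hr' => by rw [h r' (List.mem_cons_of_mem _ hr'), hz]), hz]

lemma pvColsGetD (l : List (List Int)) (init : List Int) (h : ∀ r ∈ l, r.length = init.length)
    (k : Nat) :
    (l.foldl (fun c r => List.zipWith (fun c v => c + v) c r) init).getD k 0
    = init.getD k 0 + (l.map (fun r => r.getD k 0)).sum := by
  induction l generalizing init with
  | nil => simp
  | cons r rs ih =>
    have hz : (List.zipWith (fun c v => c + v) init r).length = init.length := by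
      rw [List.length_zipWith, h r (List.mem_cons_self ..)]; omega
    rw [List.foldl_cons, ih _ (fun r' hr' => by rw [h r' (List.mem_cons_of_mem _ hr'), hz]),
        List.map_cons, List.sum_cons]
    by_cases hk : k < init.length
    · have hr : k < r.length := by rw [h r (List.mem_cons_self ..)]; exact hk
      rw [List.getD_eq_getElem _ _ (hz ▸ hk), List.getElem_zipWith,
          List.getD_eq_getElem _ _ hk, List.getD_eq_getElem _ _ hr]
      ring
    · have hk' : init.length ≤ k := by omega
      rw [List.getD_eq_default _ _ (by rw [hz]; exact hk'), List.getD_eq_default _ _ hk',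
          List.getD_eq_default _ _ (by rw [h r (List.mem_cons_self ..)]; exact hk')]
      ring

lemma pvLoop (n : Nat) (l : List (Int × List Int)) (cols : List Int) (d1 d2 : Int) :
    bingoLoop n l cols d1 d2
    = (l.any (fun p => p.2.sum == 0) ||
       ((l.foldl (fun x p => List.zipWith (fun c v => c + v) x p.2) cols).contains 0 ||
        ((l.foldl (fun x p => x + PySem.List.pyGetD p.2 p.1 0) d1 == 0) ||
         (l.foldl (fun x p => x + PySem.List.pyGetD p.2 ((n : Int) - 1 - p.1) 0) d2 == 0)))) := by
  induction l generalizing cols d1 d2 with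
  | nil => simp [bingoLoop, Bool.or_assoc]
  | cons p rest ih =>
    rw [bingoLoop]
    by_cases hz : p.2.sum == 0
    · simp [hz]
    · simp [hz, ih]

lemma pvA1 (card : List (List Int)) (h : ∀ r ∈ card, r.length = card.length)
    (hm : (PySem.List.pyGetD card 0 []).length = card.length) :
    ((PySem.List.pyRange 0 (PySem.List.len card) 1).any (fun row =>
       (PySem.List.pyRange 0 (PySem.List.len (PySem.List.pyGetD card 0 [])) 1).foldl
         (fun bingo_sum col => bingo_sum + PySem.List.pyGetD (PySem.List.pyGetD card row []) col 0) 0 == 0))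
    = card.any (fun r => r.sum == 0) := by
  rw [PySem.List.len_eq, PySem.List.len_eq, hm]
  have step1 : ∀ row ∈ PySem.List.pyRange 0 (card.length : Int) 1,
      ((PySem.List.pyRange 0 (card.length : Int) 1).foldl
         (fun bingo_sum col => bingo_sum + PySem.List.pyGetD (PySem.List.pyGetD card row []) col 0) 0 == 0)
      = ((PySem.List.pyGetD card row []).sum == 0) := by
    intro row hrow
    obtain ⟨h0, hlt⟩ := PySem.List.mem_pyRange_one.mp hrow
    have hin : PySem.Raise.InRange card.length row := by
      simp [PySem.Raise.InRange]; omega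
    have hR := h _ (PySem.List.pyGetD_mem card [] hin)
    rw [← hR, PySem.List.foldl_pyRange_zero_pyGetD' (PySem.List.pyGetD card row []) 0
          (fun s v => s + v) 0, ← List.sum_eq_foldl]
  rw [PySem.List.any_congr_mem step1]
  rw [show (fun row => ((PySem.List.pyGetD card row []).sum == 0))
        = ((fun r : List Int => r.sum == 0) ∘ (fun j => PySem.List.pyGetD card j [])) from rfl,
      ← List.any_map, PySem.List.map_pyGetD_pyRange_zero']

lemma pvA2 (card : List (List Int))
    (hm : (PySem.List.pyGetD card 0 []).length = card.length) :
    ((PySem.List.pyRange 0 (PySem.List.len card) 1).any (fun row =>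
       (PySem.List.pyRange 0 (PySem.List.len (PySem.List.pyGetD card 0 [])) 1).foldl
         (fun bingo_sum col => bingo_sum + PySem.List.pyGetD (PySem.List.pyGetD card col []) row 0) 0 == 0))
    = (List.range card.length).any (fun k => ((card.map (fun r => r.getD k 0)).sum == 0)) := by
  rw [PySem.List.len_eq, PySem.List.len_eq, hm]
  have step1 : ∀ row ∈ PySem.List.pyRange 0 (card.length : Int) 1,
      ((PySem.List.pyRange 0 (card.length : Int) 1).foldl
         (fun bingo_sum col => bingo_sum + PySem.List.pyGetD (PySem.List.pyGetD card col []) row 0) 0 == 0)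
      = ((card.map (fun r => PySem.List.pyGetD r row 0)).sum == 0) := by
    intro row _
    rw [PySem.List.foldl_pyRange_zero_pyGetD' card []
          (fun s R => s + PySem.List.pyGetD R row 0) 0,
        PySem.List.foldl_add card (fun R => PySem.List.pyGetD R row 0) 0, zero_add]
  rw [PySem.List.any_congr_mem step1, PySem.List.pyRange_zero_nat, List.any_map]
  refine PySem.List.any_congr_mem (fun k _ => ?_)
  simp [Function.comp, List.getD]

lemma pvA3 (card : List (List Int)) :
    ((PySem.List.pyRange 0 (PySem.List.len card) 1).foldl
       (fun bingo_sum row => bingo_sum + PySem.List.pyGetD (PySem.List.pyGetD card row []) row 0) 0 == 0)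
    = (((List.range card.length).map (fun k => (card.getD k []).getD k 0)).sum == 0) := by
  rw [PySem.List.len_eq,
      PySem.List.foldl_add _ (fun row => PySem.List.pyGetD (PySem.List.pyGetD card row []) row 0) 0,
      zero_add, PySem.List.pyRange_zero_nat, List.map_map]
  congr 1
  refine congrArg List.sum (List.map_congr_left (fun k _ => ?_))
  simp [Function.comp, List.getD]

lemma pvA4 (card : List (List Int)) (h : ∀ r ∈ card, r.length = card.length) :
    ((PySem.List.pyRange 0 (PySem.List.len card) 1).foldl
       (fun bingo_sum row => bingo_sum +
          PySem.List.pyGetD (PySem.List.pyGetD card row [])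
            ((row - (PySem.List.len (PySem.List.pyGetD card row []) - 1)).natAbs : Int) 0) 0 == 0)
    = (((List.range card.length).map
          (fun k => (card.getD k []).getD (card.length - 1 - k) 0)).sum == 0) := by
  rw [PySem.List.len_eq]
  have step1 : ∀ (acc : Int), ∀ row ∈ PySem.List.pyRange 0 (card.length : Int) 1,
      (acc + PySem.List.pyGetD (PySem.List.pyGetD card row [])
          ((row - (PySem.List.len (PySem.List.pyGetD card row []) - 1)).natAbs : Int) 0)
      = (acc + PySem.List.pyGetD (PySem.List.pyGetD card row [])
          ((card.length : Int) - 1 - row) 0) := by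
    intro acc row hrow
    obtain ⟨h0, hlt⟩ := PySem.List.mem_pyRange_one.mp hrow
    have hin : PySem.Raise.InRange card.length row := by
      simp [PySem.Raise.InRange]; omega
    have hR := h _ (PySem.List.pyGetD_mem card [] hin)
    rw [PySem.List.len_eq, hR]
    have hidx : ((row - ((card.length : Int) - 1)).natAbs : Int)
        = (card.length : Int) - 1 - row := by omega
    rw [hidx]
  rw [PySem.List.foldl_congr_mem _ _ _ _ step1,
      PySem.List.foldl_add _ (fun row => PySem.List.pyGetD (PySem.List.pyGetD card row [])
        ((card.length : Int) - 1 - row) 0) 0,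
      zero_add, PySem.List.pyRange_zero_nat, List.map_map]
  congr 1
  refine congrArg List.sum (List.map_congr_left (fun k hk => ?_))
  have hk' : k < card.length := List.mem_range.mp hk
  have hidx : ((card.length : Int) - 1 - (k : Int)) = ((card.length - 1 - k : Nat) : Int) := by
    omega
  simp only [Function.comp_apply, hidx, PySem.List.pyGetD_natCast]

lemma pvEnumMapInt0 (l : List (List Int)) (g : Int → List Int → Int) :
    (PySem.List.enumerate l 0).map (fun p => g p.1 p.2)
    = (List.range l.length).map (fun (k : Nat) => g ((k : Nat) : Int) (l.getD k [])) := by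
  simpa using pvEnumMapInt l 0 g

lemma pvB1 (card : List (List Int)) :
    (PySem.List.enumerate card).any (fun p => p.2.sum == 0)
    = card.any (fun r => r.sum == 0) := by
  rw [show (fun p : Int × List Int => (p.2.sum == 0))
        = ((fun r : List Int => r.sum == 0) ∘ (fun p : Int × List Int => p.2)) from rfl,
      ← List.any_map, PySem.List.map_snd_enumerate]

lemma pvBcols (card : List (List Int)) (h : ∀ r ∈ card, r.length = card.length) :
    (PySem.List.enumerate card).foldl
      (fun x p => List.zipWith (fun c v => c + v) x p.2) (List.replicate card.length 0)
    = (List.range card.length).map (fun k => (card.map (fun r => r.getD k 0)).sum) := by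
  rw [pvEnumFoldlSnd card 0 (fun x (r : List Int) => List.zipWith (fun c v => c + v) x r)
        (List.replicate card.length 0)]
  have hlr : ∀ r ∈ card, r.length = (List.replicate card.length (0 : Int)).length := by
    simpa using h
  apply List.ext_getElem
  · rw [pvColsLen _ _ hlr]; simp
  · intro i h1 h2
    rw [← List.getD_eq_getElem _ 0 h1, pvColsGetD _ _ hlr i]
    simp

lemma pvB2 (card : List (List Int)) (h : ∀ r ∈ card, r.length = card.length) :
    ((PySem.List.enumerate card).foldl
      (fun x p => List.zipWith (fun c v => c + v) x p.2) (List.replicate card.length 0)).contains 0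
    = (List.range card.length).any (fun k => ((card.map (fun r => r.getD k 0)).sum == 0)) := by
  rw [pvBcols card h, ← List.any_beq', List.any_map]
  refine PySem.List.any_congr_mem (fun k _ => ?_)
  simp [Function.comp, BEq.comm]

lemma pvB3 (card : List (List Int)) :
    ((PySem.List.enumerate card).foldl (fun x p => x + PySem.List.pyGetD p.2 p.1 0) 0 == 0)
    = (((List.range card.length).map (fun k => (card.getD k []).getD k 0)).sum == 0) := by
  rw [PySem.List.foldl_add _ (fun p : Int × List Int => PySem.List.pyGetD p.2 p.1 0) 0, zero_add,
      pvEnumMapInt0 card (fun i r => PySem.List.pyGetD r i 0)]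
  congr 1
  refine congrArg List.sum (List.map_congr_left (fun k _ => ?_))
  simp

lemma pvB4 (card : List (List Int)) :
    ((PySem.List.enumerate card).foldl
      (fun x p => x + PySem.List.pyGetD p.2 ((card.length : Int) - 1 - p.1) 0) 0 == 0)
    = (((List.range card.length).map
         (fun k => (card.getD k []).getD (card.length - 1 - k) 0)).sum == 0) := by
  rw [PySem.List.foldl_add _
        (fun p : Int × List Int => PySem.List.pyGetD p.2 ((card.length : Int) - 1 - p.1) 0) 0,
      zero_add,
      pvEnumMapInt0 card (fun i r => PySem.List.pyGetD r ((card.length : Int) - 1 - i) 0)]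
  congr 1
  refine congrArg List.sum (List.map_congr_left (fun k hk => ?_))
  have hk' : k < card.length := List.mem_range.mp hk
  have hidx : ((card.length : Int) - 1 - (k : Int))
      = ((card.length - 1 - k : Nat) : Int) := by omega
  rw [hidx]
  simp

lemma pvMainSquare (card : List (List Int)) (h : ∀ r ∈ card, r.length = card.length) :
    isItBingo card = isItBingo_alt card := by
  have hm : (PySem.List.pyGetD card 0 []).length = card.length := by
    cases card with
    | nil => rfl
    | cons r0 rest =>
      rw [PySem.List.pyGetD_zero_cons]
      exact h r0 (List.mem_cons_self ..)
  unfold isItBingo isItBingo_alt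
  rw [pvIf4, pvA1 card h hm, pvA2 card hm, pvA3 card, pvA4 card h, pvLoop,
      pvB1 card, pvB2 card h, pvB3 card, pvB4 card]

lemma pvAfirstRow (r0 : List Int) (rest : List (List Int)) (hz : r0.sum = 0) :
    isItBingo (r0 :: rest) = true := by
  unfold isItBingo
  rw [pvIf4]
  have h1 : (PySem.List.pyRange 0 (PySem.List.len (r0 :: rest)) 1).any (fun row =>
      (PySem.List.pyRange 0 (PySem.List.len (PySem.List.pyGetD (r0 :: rest) 0 [])) 1).foldl
        (fun bingo_sum col =>
          bingo_sum + PySem.List.pyGetD (PySem.List.pyGetD (r0 :: rest) row []) col 0) 0 == 0)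
      = true := by
    refine List.any_eq_true.mpr ⟨0, ?_, ?_⟩
    · rw [PySem.List.len_eq]
      exact PySem.List.mem_pyRange_one.mpr (by constructor <;> simp)
    · rw [PySem.List.pyGetD_zero_cons, PySem.List.len_eq,
          PySem.List.foldl_pyRange_zero_pyGetD' r0 0 (fun s v => s + v) 0,
          ← List.sum_eq_foldl, hz]
      rfl
  rw [h1, Bool.true_or]

lemma pvBfirstRow (r0 : List Int) (rest : List (List Int)) (hz : r0.sum = 0) :
    isItBingo_alt (r0 :: rest) = true := by
  unfold isItBingo_alt
  rw [PySem.List.enumerate_cons, bingoLoop]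
  simp [hz]

theorem pvMain (card : List (List Int)) (h : Pre_isItBingo card) :
    isItBingo card = isItBingo_alt card := by
  rcases h with h | ⟨hne, hz⟩
  · exact pvMainSquare card h
  · cases card with
    | nil => exact absurd rfl hne
    | cons r0 rest =>
      rw [pvAfirstRow r0 rest (by simpa using hz), pvBfirstRow r0 rest (by simpa using hz)]

-- ===== VERDICT (by name: the statement is the Claim_ definition above) =====
theorem isItBingo_spec : Claim_equal_isItBingo := by
  intro card _ hpre
  exact pvMain card hpre
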